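-- pv_equiv track=rewrite | github.com/Githarold/BartendAiRtist | circuit/rpi/send_commands.py | generate_lists
-- ===== SOURCE A (Python) =====
-- def generate_lists(step_input, linear_input):
--    values, indices = [], []
--    # 0이 아닌 원소와 그 인덱스를 저장
--    for i, val in enumerate(step_input):
--        if val != 0:
--            values.append(val)
--            indices.append(i)
--
--
--    # 값에 따라 오름차순 정렬
--    combined = sorted(zip(values, indices))
--    values, indices = zip(*combined) if combined else ([], [])
--
--
--    # disk_pre_rotation과 disk_rotation_list 생성
--    disk_pre_rotation = [index + 1 for index in indices]
--    disk_rotation_list = [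
--        disk_pre_rotation[i] - disk_pre_rotation[i - 1] if i > 0 else disk_pre_rotation[i] - 1
--        for i in range(len(disk_pre_rotation))
--    ]
--
--
--    # dispensor_activate_list 생성
--    dispensor_activate_list = [linear_input[index] for index in indices]
--
--
--    return disk_rotation_list, dispensor_activate_list
-- ===== SOURCE B (Python) =====
-- def generate_lists(step_input, linear_input):
--     # selection loop: repeatedly extract the minimal remaining (value, index) pair,
--     # emitting the rotation step and activation value as each pair is removed
--     pairs = [(v, i) for i, v in enumerate(step_input) if v != 0]
--     disk_rotation_list, dispensor_activate_list = [], []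
--     prev = 0
--     while pairs:
--         v, idx = min(pairs)
--         pairs.remove((v, idx))
--         disk_rotation_list.append(idx - prev)
--         prev = idx
--         dispensor_activate_list.append(linear_input[idx])
--     return disk_rotation_list, dispensor_activate_list
-- ===== Notes on version B (the rewrite author's own statement) =====
-- stated objective: alternative
-- what changed: B replaces A's library sort plus staged comprehensions (zip/unzip, disk_pre_rotation, i/i-1 indexed list) by a selection loop: it repeatedly extracts the minimal remaining (value,index) pair with min/remove and emits the rotation step (index minus running previous index) and the activation value in that same loop.
import Mathlib
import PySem

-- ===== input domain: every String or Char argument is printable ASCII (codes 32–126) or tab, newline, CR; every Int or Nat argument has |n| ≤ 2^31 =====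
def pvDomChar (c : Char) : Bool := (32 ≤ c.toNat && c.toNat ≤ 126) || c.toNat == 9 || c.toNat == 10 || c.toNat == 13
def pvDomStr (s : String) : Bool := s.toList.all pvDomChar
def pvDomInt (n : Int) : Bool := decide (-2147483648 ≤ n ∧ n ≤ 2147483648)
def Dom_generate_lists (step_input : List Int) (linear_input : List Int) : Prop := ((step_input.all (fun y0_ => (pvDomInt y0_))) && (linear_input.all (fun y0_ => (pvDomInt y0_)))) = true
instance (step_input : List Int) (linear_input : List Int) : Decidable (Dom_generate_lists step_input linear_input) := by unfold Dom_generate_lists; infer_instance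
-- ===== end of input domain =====

-- B replaces A's library sort + staged comprehensions by a min/remove selection loop that
-- emits the rotation step and activation value as each minimal pair is extracted (alternative).
-- ===== PORT A =====
def generate_lists (step_input : List Int) (linear_input : List Int) : List Int × List Int :=
  let vi := (PySem.List.enumerate step_input 0).foldl
      (fun (st : List Int × List Int) p =>
        if p.2 != 0 then (st.1 ++ [p.2], st.2 ++ [p.1]) else st) ([], [])
  let combined := PySem.List.sorted2 (vi.1.zip vi.2) (fun x => x.1) (fun x => x.2) false
  let indices := combined.map (fun x => x.2)
  let disk_pre_rotation := indices.map (fun idx => idx + 1)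
  let disk_rotation_list := (List.range disk_pre_rotation.length).map (fun i =>
      if 0 < i then disk_pre_rotation.getD i 0 - disk_pre_rotation.getD (i - 1) 0
      else disk_pre_rotation.getD i 0 - 1)
  let dispensor_activate_list := indices.map (fun idx => (PySem.List.pyGet? linear_input idx).getD 0)
  (disk_rotation_list, dispensor_activate_list)

-- ===== PORT B =====
-- termination helper for the selection loop (pairs.remove shortens the list)
lemma pv_remove_length {α : Type} [BEq α] [LawfulBEq α] (xs : List α) (v : α) (r : List α)
    (h : PySem.List.remove? xs v = some r) : r.length < xs.length := by
  have hv : v ∈ xs := by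
    by_contra hc
    rw [(PySem.List.remove?_eq_none_iff xs v).2 hc] at h
    simp at h
  rw [PySem.List.remove?_eq_some_erase xs v hv] at h
  cases h
  have hpos : 0 < xs.length := List.length_pos_of_mem hv
  have := List.length_erase_of_mem hv
  omega

-- the while-loop of B: extract min(pairs), remove it, emit rotation step and activation value
def pvSelLoop (linear_input : List Int) (pairs : List (Int × Int)) (prev : Int)
    (rot act : List Int) : List Int × List Int :=
  match PySem.List.min2? pairs (fun p => p.1) (fun p => p.2) with
  | none => (rot, act)
  | some m =>
    match hr : PySem.List.remove? pairs m with
    | none => (rot, act)   -- unreachable: the minimum is a member of pairs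
    | some rest =>
      pvSelLoop linear_input rest m.2 (rot ++ [m.2 - prev])
        (act ++ [(PySem.List.pyGet? linear_input m.2).getD 0])
termination_by pairs.length
decreasing_by exact pv_remove_length _ _ _ hr

def generate_lists_alt (step_input : List Int) (linear_input : List Int) : List Int × List Int :=
  let pairs := ((PySem.List.enumerate step_input 0).filter (fun p => p.2 != 0)).map
      (fun p => (p.2, p.1))
  pvSelLoop linear_input pairs 0 [] []

-- ===== PRECONDITION & SPEC =====
-- Pre_ excludes exactly the inputs where Python A raises IndexError: a nonzero entry of
-- step_input at a position that is not a valid index into linear_input.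
def Pre_generate_lists (step_input : List Int) (linear_input : List Int) : Prop :=
  ∀ i ∈ List.range step_input.length, step_input.getD i 0 ≠ 0 → i < linear_input.length
instance (step_input : List Int) (linear_input : List Int) : Decidable (Pre_generate_lists step_input linear_input) := by unfold Pre_generate_lists; infer_instance
def pvWitness_generate_lists : List Int × List Int := ([3, 0, 1, 3], [10, 20, 30, 40])
def Spec_generate_lists (step_input : List Int) (linear_input : List Int) (out : List Int × List Int) : Prop := out = generate_lists_alt step_input linear_input
instance (step_input : List Int) (linear_input : List Int) (out : List Int × List Int) : Decidable (Spec_generate_lists step_input linear_input out) := by unfold Spec_generate_lists; infer_instance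

-- ===== CLAIM (what is proved, stated in full; the proofs are below) =====
def Claim_equal_generate_lists : Prop := ∀ (step_input : List Int) (linear_input : List Int), Dom_generate_lists step_input linear_input → Pre_generate_lists step_input linear_input → Spec_generate_lists step_input linear_input (generate_lists step_input linear_input)

-- ===== LEMMAS AND PROOFS =====

-- the lexicographic tuple comparison Python uses, as Mathlib's Lex order on pairs
lemma pv_lexb (a b : Int × Int) :
    (decide (a.1 < b.1) || !decide (b.1 < a.1) && decide (a.2 < b.2))
      = decide ((toLex a : Lex (Int × Int)) < toLex b) := by
  by_cases h1 : a.1 < b.1 <;> by_cases h2 : b.1 < a.1 <;> by_cases h3 : a.2 < b.2 <;>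
    simp [Prod.Lex.lt_iff, h1, h2, h3] <;> omega

-- A's sorted2 over tuple keys is sort by the Lex key
lemma pv_sorted2_eq (xs : List (Int × Int)) :
    PySem.List.sorted2 xs (fun x => x.1) (fun x => x.2) false
      = PySem.List.sorted xs (fun x => (toLex x : Lex (Int × Int))) false := by
  have hb : (fun a b : Int × Int =>
        (decide (a.1 < b.1) || !decide (b.1 < a.1) && decide (a.2 < b.2)))
      = (fun a b : Int × Int => decide ((toLex a : Lex (Int × Int)) < toLex b)) := by
    funext a b; exact pv_lexb a b
  simp only [PySem.List.sorted2, PySem.List.sorted, hb]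
  simp

-- A's first loop builds the filtered values and indices lists
lemma pvFoldA_aux (l : List (Int × Int)) (v idl : List Int) :
    l.foldl (fun (st : List Int × List Int) p =>
        if p.2 != 0 then (st.1 ++ [p.2], st.2 ++ [p.1]) else st) (v, idl)
      = (v ++ (l.filter (fun p => p.2 != 0)).map (fun p => p.2),
         idl ++ (l.filter (fun p => p.2 != 0)).map (fun p => p.1)) := by
  induction l generalizing v idl with
  | nil => simp
  | cons x t ih =>
    by_cases hx : x.2 = 0
    · have hb : (x.2 != 0) = false := by simp [hx]
      simp only [List.foldl_cons, List.filter_cons, hb, Bool.false_eq_true, if_false]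
      exact ih v idl
    · have hb : (x.2 != 0) = true := by simp [hx]
      simp only [List.foldl_cons, List.filter_cons, hb, if_true]
      rw [ih]
      simp

lemma pvFoldA (l : List (Int × Int)) :
    l.foldl (fun (st : List Int × List Int) p =>
        if p.2 != 0 then (st.1 ++ [p.2], st.2 ++ [p.1]) else st) ([], [])
      = ((l.filter (fun p => p.2 != 0)).map (fun p => p.2),
         (l.filter (fun p => p.2 != 0)).map (fun p => p.1)) := by
  simpa using pvFoldA_aux l [] []

-- consecutive differences of idxs, seeded with prev
def pvDiffs (prev : Int) : List Int → List Int
  | [] => []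
  | x :: t => (x - prev) :: pvDiffs x t

lemma pvDiffs_eq_zip (prev : Int) (idxs : List Int) :
    pvDiffs prev idxs = (idxs.zip (prev :: idxs)).map (fun p => p.1 - p.2) := by
  induction idxs generalizing prev with
  | nil => rfl
  | cons x t ih => simp [pvDiffs, ih x]

-- A's indexed comprehension over disk_pre_rotation equals the consecutive differences
lemma pvRotA (idxs : List Int) :
    (List.range (idxs.map (fun idx => idx + 1)).length).map (fun i =>
        if 0 < i then (idxs.map (fun idx => idx + 1)).getD i 0 - (idxs.map (fun idx => idx + 1)).getD (i - 1) 0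
        else (idxs.map (fun idx => idx + 1)).getD i 0 - 1)
      = pvDiffs 0 idxs := by
  rw [pvDiffs_eq_zip]
  apply List.ext_getElem
  · simp
  · intro i h1 h2
    simp only [List.length_map, List.length_range] at h1
    have hn : i < idxs.length := by simpa using h1
    have hm : i < (idxs.map (fun idx => idx + 1)).length := by simpa using hn
    have hz : i < (idxs.zip ((0 : Int) :: idxs)).length := by simp [hn]
    have hc : i < ((0 : Int) :: idxs).length := by simp; omega
    simp only [List.getElem_map, List.getElem_range, List.getElem_zip]
    rcases Nat.eq_zero_or_pos i with hi | hi
    · subst hi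
      rw [if_neg (by omega), List.getD_eq_getElem _ _ hm]
      simp
    · have hm1 : i - 1 < (idxs.map (fun idx => idx + 1)).length := by simp; omega
      rw [if_pos hi, List.getD_eq_getElem _ _ hm, List.getD_eq_getElem _ _ hm1]
      have hcons : ((0 : Int) :: idxs)[i]'hc = idxs[i - 1]'(by omega) := by
        rcases i with _ | j
        · omega
        · simp
      simp only [List.getElem_map, hcons]
      omega

-- the fold step of min2?, named so the fold lemmas below can speak about it
def pvMinStep (acc : Option (Int × Int)) (x : Int × Int) : Option (Int × Int) :=
  match acc with
  | none => some x
  | some m => if (decide (x.1 < m.1) || !decide (m.1 < x.1) && decide (x.2 < m.2)) = true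
      then some x else some m

lemma pv_min2_eq_foldl (l : List (Int × Int)) :
    PySem.List.min2? l (fun p => p.1) (fun p => p.2) = l.foldl pvMinStep none := by
  simp only [PySem.List.min2?]
  exact List.foldl_ext _ _ none (fun a b _ => by cases a <;> rfl)

lemma pvMinStep_some (m x : Int × Int) :
    pvMinStep (some m) x
      = if (toLex x : Lex (Int × Int)) < toLex m then some x else some m := by
  simp only [pvMinStep]
  rw [pv_lexb]
  simp

-- min2? on a nonempty list: the fold with a some-accumulator yields a minimal member
lemma pv_min2_fold (l : List (Int × Int)) (a : Int × Int) :
    ∃ r, l.foldl pvMinStep (some a) = some r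
      ∧ (r = a ∨ r ∈ l) ∧ (toLex r : Lex (Int × Int)) ≤ toLex a ∧ ∀ y ∈ l, (toLex r : Lex (Int × Int)) ≤ toLex y := by
  induction l generalizing a with
  | nil => exact ⟨a, rfl, Or.inl rfl, le_refl _, by simp⟩
  | cons x t ih =>
    rw [List.foldl_cons, pvMinStep_some]
    by_cases hlt : (toLex x : Lex (Int × Int)) < toLex a
    · rw [if_pos hlt]
      obtain ⟨r, hr, hmem, hle, hmin⟩ := ih x
      exact ⟨r, hr, Or.inr (hmem.elim (fun h => by simp [h]) (fun h => by simp [h])),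
        le_trans hle (le_of_lt hlt),
        fun y hy => by
          rcases List.mem_cons.1 hy with h | h
          · exact h ▸ hle
          · exact hmin y h⟩
    · rw [if_neg hlt]
      obtain ⟨r, hr, hmem, hle, hmin⟩ := ih a
      exact ⟨r, hr, hmem.elim (fun h => Or.inl h) (fun h => Or.inr (by simp [h])),
        hle,
        fun y hy => by
          rcases List.mem_cons.1 hy with h | h
          · exact h ▸ le_trans hle (not_lt.1 hlt)
          · exact hmin y h⟩

lemma pv_min2_none (l : List (Int × Int))
    (h : PySem.List.min2? l (fun p => p.1) (fun p => p.2) = none) : l = [] := by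
  cases l with
  | nil => rfl
  | cons x t =>
    obtain ⟨r, hr, _⟩ := pv_min2_fold t x
    rw [pv_min2_eq_foldl, List.foldl_cons] at h
    rw [show pvMinStep none x = some x from rfl, hr] at h
    simp at h

lemma pv_min2_spec (l : List (Int × Int)) (m : Int × Int)
    (h : PySem.List.min2? l (fun p => p.1) (fun p => p.2) = some m) :
    m ∈ l ∧ ∀ y ∈ l, (toLex m : Lex (Int × Int)) ≤ toLex y := by
  cases l with
  | nil => rw [pv_min2_eq_foldl] at h; simp at h
  | cons x t =>
    obtain ⟨r, hr, hmem, hle, hmin⟩ := pv_min2_fold t x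
    rw [pv_min2_eq_foldl, List.foldl_cons] at h
    rw [show pvMinStep none x = some x from rfl, hr] at h
    cases h
    refine ⟨?_, fun y hy => ?_⟩
    · rcases hmem with h | h
      · simp [h]
      · exact List.mem_cons_of_mem _ h
    · rcases List.mem_cons.1 hy with h | h
      · exact h ▸ hle
      · exact hmin y h

-- on a list with pairwise-distinct indices, the sorted list is min :: sorted (rest)
lemma pv_sorted_cons (l : List (Int × Int)) (hd : l.Pairwise (fun a b => a.2 ≠ b.2))
    (m : Int × Int) (h : PySem.List.min2? l (fun p => p.1) (fun p => p.2) = some m) :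
    PySem.List.sorted l (fun x => (toLex x : Lex (Int × Int))) false
      = m :: PySem.List.sorted (l.erase m) (fun x => (toLex x : Lex (Int × Int))) false := by
  obtain ⟨hmem, hmin⟩ := pv_min2_spec l m h
  have hnd : l.Nodup := hd.imp (fun hne => fun he => hne (by rw [he]))
  have hperm : (m :: PySem.List.sorted (l.erase m) (fun x => (toLex x : Lex (Int × Int))) false).Perm l := by
    refine List.Perm.trans (List.Perm.cons m (PySem.List.sorted_perm _ _ _)) ?_
    exact (List.perm_cons_erase hmem).symm
  apply PySem.List.sorted_eq_of_perm_of_pairwise_lt _ _ _ hperm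
  have hkey : ∀ y ∈ l.erase m, (toLex m : Lex (Int × Int)) < toLex y := by
    intro y hy
    have hyl : y ∈ l := List.mem_of_mem_erase hy
    refine lt_of_le_of_ne (hmin y hyl) (fun he => ?_)
    have : m = y := by
      have := congrArg (fun z : Lex (Int × Int) => (ofLex z : Int × Int)) he
      simpa using this
    exact hnd.not_mem_erase (this ▸ hy)
  constructor
  · intro y hy
    exact hkey y ((PySem.List.mem_sorted _ _ _ _).1 hy)
  · have hle := PySem.List.sorted_pairwise (l.erase m) (fun x => (toLex x : Lex (Int × Int)))
    have hne : (PySem.List.sorted (l.erase m) (fun x => (toLex x : Lex (Int × Int))) false).Nodup :=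
      ((PySem.List.sorted_perm _ _ _).nodup_iff).2 (hnd.erase m)
    exact (hle.and hne).imp (fun hab => lt_of_le_of_ne hab.1 (fun he => hab.2 (by
      have := congrArg (fun z : Lex (Int × Int) => (ofLex z : Int × Int)) he
      simpa using this)))

-- B's selection loop equals the accumulator pass over the Lex-sorted pairs
lemma pv_selLoop_eq (linear_input : List Int) : ∀ (l : List (Int × Int)),
    l.Pairwise (fun a b => a.2 ≠ b.2) → ∀ (prev : Int) (rot act : List Int),
    pvSelLoop linear_input l prev rot act
      = (rot ++ pvDiffs prev ((PySem.List.sorted l (fun x => (toLex x : Lex (Int × Int))) false).map (fun p => p.2)),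
         act ++ ((PySem.List.sorted l (fun x => (toLex x : Lex (Int × Int))) false).map (fun p => p.2)).map
           (fun idx => (PySem.List.pyGet? linear_input idx).getD 0)) := by
  intro l
  induction hn : l.length using Nat.strong_induction_on generalizing l with
  | _ n ih =>
    subst hn
    intro hd prev rot act
    rw [pvSelLoop]
    split
    next hm =>
      have : l = [] := pv_min2_none l hm
      subst this
      simp [PySem.List.sorted, pvDiffs]
    next m hm =>
      have hmem := (pv_min2_spec l m hm).1
      split
      next hr =>
        exact absurd hmem ((PySem.List.remove?_eq_none_iff l m).1 hr)
      next rest hr =>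
        rw [PySem.List.remove?_eq_some_erase l m hmem] at hr
        cases hr
        have hsub : (l.erase m).Sublist l := List.erase_sublist
        have hlen : 0 < l.length := List.length_pos_of_mem hmem
        have hlt : (l.erase m).length < l.length := by
          have := List.length_erase_of_mem hmem
          omega
        rw [ih (l.erase m).length hlt (l.erase m) rfl (List.Pairwise.sublist hsub hd) m.2
          (rot ++ [m.2 - prev]) (act ++ [(PySem.List.pyGet? linear_input m.2).getD 0])]
        rw [pv_sorted_cons l hd m hm]
        simp [pvDiffs]

-- the (value, index) pairs built from enumerate have pairwise-distinct indices
lemma pv_pairs_distinct (step_input : List Int) :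
    (((PySem.List.enumerate step_input 0).filter (fun p => p.2 != 0)).map
        (fun p => (p.2, p.1))).Pairwise (fun a b : Int × Int => a.2 ≠ b.2) := by
  rw [List.pairwise_map]
  exact (List.Pairwise.sublist List.filter_sublist
    (PySem.List.pairwise_lt_enumerate step_input 0)).imp (fun h => by omega)

-- ===== VERDICT (by name: the statement is the Claim_ definition above) =====
theorem generate_lists_spec : Claim_equal_generate_lists := by
  intro step_input linear_input _ _
  unfold Spec_generate_lists
  simp only [generate_lists, generate_lists_alt, pvFoldA, List.zip_map', pv_sorted2_eq]
  rw [pv_selLoop_eq linear_input _ (pv_pairs_distinct step_input) 0 [] []]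
  rw [pvRotA]
  simp [List.map_map]
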